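-- pv_equiv track=rewrite | github.com/wajiulhassan/Port-Scanner | main.py | clean_target
-- ===== SOURCE A (Python) =====
-- def clean_target(target):
--     """
--     Remove protocol prefix and trailing slash from target.
--
--     Args:
--         target (str): Target URL or IP address
--
--     Returns:
--         str: Cleaned target hostname or IP
--     """
--     protocols = ["http://", "https://", "ftp://", "ftps://", "wss://"]
--     target_lower = target.lower()
--
--     for protocol in protocols:
--         if target_lower.startswith(protocol):
--             target = target[len(protocol):]
--             break
--
--     return target.rstrip('/')
-- ===== SOURCE B (Python) =====
-- def clean_target(target):
--     """
--     Remove protocol prefix and trailing slash from target.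
--
--     Args:
--         target (str): Target URL or IP address
--
--     Returns:
--         str: Cleaned target hostname or IP
--     """
--     scheme, sep, rest = target.partition('://')
--     if sep and scheme.lower() in ('http', 'https', 'ftp', 'ftps', 'wss'):
--         target = rest
--     return target.rstrip('/')
-- ===== Notes on version B (the rewrite author's own statement) =====
-- stated objective: idiomatic
-- what changed: Instead of looping over a list of protocol prefixes and testing startswith for each, B splits the target once at the first scheme separator with str.partition and keeps the remainder when the scheme part (case-insensitively) is one of the five known schemes.
import Mathlib
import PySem

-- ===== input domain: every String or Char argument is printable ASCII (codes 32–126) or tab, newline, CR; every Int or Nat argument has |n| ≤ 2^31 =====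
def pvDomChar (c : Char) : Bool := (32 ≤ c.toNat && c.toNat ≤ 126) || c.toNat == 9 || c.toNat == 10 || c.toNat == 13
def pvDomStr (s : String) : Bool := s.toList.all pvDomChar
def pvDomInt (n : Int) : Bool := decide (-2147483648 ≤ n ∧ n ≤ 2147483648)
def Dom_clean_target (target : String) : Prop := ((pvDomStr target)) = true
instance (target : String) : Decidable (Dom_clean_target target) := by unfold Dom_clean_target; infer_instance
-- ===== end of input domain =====

-- B replaces A's loop over protocol prefixes with a single partition at the first "://" plus a scheme lookup (idiomatic; same return value on every input).


-- exact port of Python's str.rstrip('/') (drop trailing '/' characters), used by both ports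
def pyRstripSlash (s : String) : String :=
  String.ofList ((s.toList.reverse.dropWhile (fun c => c == '/')).reverse)

-- ===== PORT A =====
def cleanLoop (ps : List String) (target : String) (target_lower : String) : String :=
  match ps with
  | [] => target
  | p :: rest =>
      if PySem.Str.startswith target_lower p then
        PySem.Str.slice target (some (PySem.Str.len p)) none
      else cleanLoop rest target target_lower

def clean_target (target : String) : String :=
  let protocols : List String := ["http://", "https://", "ftp://", "ftps://", "wss://"]
  let target_lower := PySem.Str.lower target
  pyRstripSlash (cleanLoop protocols target target_lower)

-- ===== PORT B =====
-- target.partition('://') is ported exactly as find of the first occurrence + the two slices around it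
def clean_target_alt (target : String) : String :=
  let i := PySem.Str.find target "://"
  let target' :=
    if i ≠ -1 ∧ PySem.Str.lower (PySem.Str.slice target none (some i)) ∈ (["http", "https", "ftp", "ftps", "wss"] : List String) then
      PySem.Str.slice target (some (i + 3)) none
    else target
  pyRstripSlash target'

-- ===== PRECONDITION & SPEC =====
def Spec_clean_target (target : String) (out : String) : Prop := out = clean_target_alt target
instance (target : String) (out : String) : Decidable (Spec_clean_target target out) := by unfold Spec_clean_target; infer_instance

-- ===== CLAIM (what is proved, stated in full; the proofs are below) =====
def Claim_equal_clean_target : Prop := ∀ (target : String), Dom_clean_target target → Spec_clean_target target (clean_target target)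

-- ===== LEMMAS AND PROOFS =====

theorem lowerChar_fix (c d : Char) (hd : d.toNat < 97 ∨ 122 < d.toNat)
    (h : PySem.Chars.lowerChar c = d) : c = d := by
  unfold PySem.Chars.lowerChar PySem.Chars.isupper at h
  split_ifs at h with hu
  · simp only [decide_eq_true_eq, Bool.and_eq_true] at hu
    have h1 : (65:Nat) ≤ c.toNat := by
      have := hu.1; rw [Char.le_def] at this; exact_mod_cast this
    have h2 : c.toNat ≤ 90 := by
      have := hu.2; rw [Char.le_def] at this; exact_mod_cast this
    have := congrArg Char.toNat h
    rw [Char.toNat_ofNat] at this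
    rw [if_pos (by constructor; omega)] at this
    omega
  · exact h
theorem go_cons_ne (c : Char) (t : List Char) (k : Nat) (h : c ≠ ':') :
    PySem.Chars.find.go [':','/','/'] (c :: t) k = PySem.Chars.find.go [':','/','/'] t (k+1) := by
  rw [PySem.Chars.find.go]
  have : [':','/','/'].isPrefixOf (c :: t) = false := by
    simp [List.isPrefixOf, Ne.symm h]
  simp [this]

theorem go_match (t : List Char) (k : Nat) :
    PySem.Chars.find.go [':','/','/'] (':' :: '/' :: '/' :: t) k = (k : Int) := by
  rw [PySem.Chars.find.go]
  simp [List.isPrefixOf]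

theorem prefix_map_cons {f : Char → Char} {x : Char} {xs : List Char} {cs : List Char}
    (h : (x :: xs) <+: List.map f cs) :
    ∃ c cs', cs = c :: cs' ∧ f c = x ∧ xs <+: List.map f cs' := by
  cases cs with
  | nil => simp at h
  | cons c cs' =>
      obtain ⟨t, ht⟩ := h
      simp only [List.map_cons, List.cons_append] at ht
      obtain ⟨h1, h2⟩ := List.cons.injEq .. ▸ ht
      exact ⟨c, cs', rfl, h1.symm, ⟨t, h2⟩⟩

theorem fwd_go (sch : List Char) (cs : List Char) (k : Nat) (hcol : ':' ∉ sch)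
    (h : (sch ++ [':','/','/']) <+: PySem.Chars.lower cs) :
    PySem.Chars.find.go [':','/','/'] cs k = ((k : Int) + sch.length) ∧
      PySem.Chars.lower (cs.take sch.length) = sch := by
  induction sch generalizing cs k with
  | nil =>
      simp only [List.nil_append] at h
      unfold PySem.Chars.lower at h
      obtain ⟨c0, cs1, rfl, h0, h⟩ := prefix_map_cons h
      obtain ⟨c1, cs2, rfl, h1, h⟩ := prefix_map_cons h
      obtain ⟨c2, cs3, rfl, h2, h⟩ := prefix_map_cons h
      have e0 : c0 = ':' := lowerChar_fix _ _ (by decide) h0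
      have e1 : c1 = '/' := lowerChar_fix _ _ (by decide) h1
      have e2 : c2 = '/' := lowerChar_fix _ _ (by decide) h2
      subst e0; subst e1; subst e2
      exact ⟨by simpa using go_match cs3 k, by simp [PySem.Chars.lower]⟩
  | cons a sch' ih =>
      simp only [List.cons_append] at h
      unfold PySem.Chars.lower at h
      obtain ⟨c, cs', rfl, hc, h⟩ := prefix_map_cons h
      have hane : a ≠ ':' := fun he => hcol (by simp [he])
      have hcne : c ≠ ':' := by
        intro he; subst he
        exact hane (by simpa using hc.symm)
      have ih' := ih cs' (k+1) (fun hm => hcol (List.mem_cons_of_mem _ hm)) h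
      constructor
      · rw [go_cons_ne c cs' k hcne, ih'.1]
        simp only [List.length_cons]; push_cast; ring
      · simp only [List.length_cons, List.take_succ_cons]
        show PySem.Chars.lower (c :: List.take sch'.length cs') = a :: sch'
        unfold PySem.Chars.lower
        rw [List.map_cons, hc]
        exact congrArg (a :: ·) ih'.2

theorem fwd (sch cs : List Char) (hcol : ':' ∉ sch)
    (h : (sch ++ [':','/','/']) <+: PySem.Chars.lower cs) :
    PySem.Chars.find cs [':','/','/'] = (sch.length : Int) ∧
      PySem.Chars.lower (cs.take sch.length) = sch := by
  have := fwd_go sch cs 0 hcol h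
  unfold PySem.Chars.find
  simpa using this

theorem bwd (sch cs : List Char) (hfind : PySem.Chars.find cs [':','/','/'] ≠ -1)
    (hlow : PySem.Chars.lower (PySem.Chars.slice cs none (some (PySem.Chars.find cs [':','/','/']))) = sch) :
    (sch ++ [':','/','/']) <+: PySem.Chars.lower cs := by
  have hspec := PySem.Chars.findFrom_natCast_spec cs [':','/','/'] 0 (Nat.zero_le _) (by simpa using hfind)
  simp only [PySem.Chars.findFrom_zero, Nat.cast_zero] at hspec
  obtain ⟨h0, hpre, -⟩ := hspec
  have hfi : PySem.Chars.find cs [':','/','/'] = ((PySem.Chars.find cs [':','/','/']).toNat : Int) :=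
    (Int.toNat_of_nonneg h0).symm
  set i := (PySem.Chars.find cs [':','/','/']).toNat with hi
  rw [hfi, PySem.Chars.slice_eq_listSlice, PySem.List.slice_to_natCast] at hlow
  obtain ⟨r, hr⟩ := hpre
  have hcs : cs = cs.take i ++ (':' :: '/' :: '/' :: r) := by
    conv_lhs => rw [← List.take_append_drop i cs]
    rw [← hr]; rfl
  refine ⟨PySem.Chars.lower r, ?_⟩
  conv_rhs => rw [hcs]
  unfold PySem.Chars.lower at hlow ⊢
  have l1 : PySem.Chars.lowerChar ':' = ':' := by decide
  have l2 : PySem.Chars.lowerChar '/' = '/' := by decide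
  simp [List.map_append, l1, l2, hlow]

theorem match_case (target protoS schS : String) (sch : List Char)
    (hsch : schS.toList = sch) (hproto : protoS.toList = sch ++ [':','/','/'])
    (hcol : ':' ∉ sch)
    (h : PySem.Str.startswith (PySem.Str.lower target) protoS = true) :
    PySem.Str.find target "://" = (sch.length : Int) ∧
      PySem.Str.lower (PySem.Str.slice target none (some (sch.length : Int))) = schS := by
  rw [PySem.Str.startswith_eq, PySem.Str.toList_lower, hproto, PySem.Chars.startswith_iff] at h
  obtain ⟨hfind, hlow⟩ := fwd sch target.toList hcol h
  have hsub : ("://" : String).toList = [':','/','/'] := by decide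
  refine ⟨by rw [PySem.Str.find_eq, hsub]; exact hfind, ?_⟩
  apply String.toList_inj.mp
  rw [PySem.Str.toList_lower, PySem.Str.toList_slice, PySem.Chars.slice_eq_listSlice,
    PySem.List.slice_to_natCast, hsch]
  exact hlow

theorem nomatch_case (target protoS schS : String) (sch : List Char)
    (hsch : schS.toList = sch) (hproto : protoS.toList = sch ++ [':','/','/'])
    (hfind : PySem.Str.find target "://" ≠ -1)
    (hlow : PySem.Str.lower (PySem.Str.slice target none (some (PySem.Str.find target "://"))) = schS) :
    PySem.Str.startswith (PySem.Str.lower target) protoS = true := by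
  have hsub : ("://" : String).toList = [':','/','/'] := by decide
  rw [PySem.Str.find_eq, hsub] at hfind hlow
  have hlow' := congrArg String.toList hlow
  rw [PySem.Str.toList_lower, PySem.Str.toList_slice, hsch] at hlow'
  rw [PySem.Str.startswith_eq, PySem.Str.toList_lower, hproto, PySem.Chars.startswith_iff]
  exact bwd sch target.toList hfind hlow'

-- ===== VERDICT (by name: the statement is the Claim_ definition above) =====
theorem clean_target_spec : Claim_equal_clean_target := by
  intro target _
  unfold Spec_clean_target
  simp only [clean_target, clean_target_alt, cleanLoop]
  congr 1
  by_cases h1 : PySem.Str.startswith (PySem.Str.lower target) "http://" = true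
  · obtain ⟨hf, hl⟩ := match_case target "http://" "http" ['h','t','t','p'] (by decide) (by decide) (by decide) h1
    have hf' : PySem.Str.find target "://" = (4:Int) := by simpa using hf
    have hl' : PySem.Str.lower (PySem.Str.slice target none (some (4:Int))) = "http" := by simpa using hl
    rw [if_pos h1, hf', if_pos ⟨by norm_num, by rw [hl']; decide⟩]
    rw [(by decide : PySem.Str.len "http://" = (7:Int))]; norm_num
  · by_cases h2 : PySem.Str.startswith (PySem.Str.lower target) "https://" = true
    · obtain ⟨hf, hl⟩ := match_case target "https://" "https" ['h','t','t','p','s'] (by decide) (by decide) (by decide) h2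
      have hf' : PySem.Str.find target "://" = (5:Int) := by simpa using hf
      have hl' : PySem.Str.lower (PySem.Str.slice target none (some (5:Int))) = "https" := by simpa using hl
      rw [if_neg h1, if_pos h2, hf', if_pos ⟨by norm_num, by rw [hl']; decide⟩]
      rw [(by decide : PySem.Str.len "https://" = (8:Int))]; norm_num
    · by_cases h3 : PySem.Str.startswith (PySem.Str.lower target) "ftp://" = true
      · obtain ⟨hf, hl⟩ := match_case target "ftp://" "ftp" ['f','t','p'] (by decide) (by decide) (by decide) h3
        have hf' : PySem.Str.find target "://" = (3:Int) := by simpa using hf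
        have hl' : PySem.Str.lower (PySem.Str.slice target none (some (3:Int))) = "ftp" := by simpa using hl
        rw [if_neg h1, if_neg h2, if_pos h3, hf', if_pos ⟨by norm_num, by rw [hl']; decide⟩]
        rw [(by decide : PySem.Str.len "ftp://" = (6:Int))]; norm_num
      · by_cases h4 : PySem.Str.startswith (PySem.Str.lower target) "ftps://" = true
        · obtain ⟨hf, hl⟩ := match_case target "ftps://" "ftps" ['f','t','p','s'] (by decide) (by decide) (by decide) h4
          have hf' : PySem.Str.find target "://" = (4:Int) := by simpa using hf
          have hl' : PySem.Str.lower (PySem.Str.slice target none (some (4:Int))) = "ftps" := by simpa using hl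
          rw [if_neg h1, if_neg h2, if_neg h3, if_pos h4, hf', if_pos ⟨by norm_num, by rw [hl']; decide⟩]
          rw [(by decide : PySem.Str.len "ftps://" = (7:Int))]; norm_num
        · by_cases h5 : PySem.Str.startswith (PySem.Str.lower target) "wss://" = true
          · obtain ⟨hf, hl⟩ := match_case target "wss://" "wss" ['w','s','s'] (by decide) (by decide) (by decide) h5
            have hf' : PySem.Str.find target "://" = (3:Int) := by simpa using hf
            have hl' : PySem.Str.lower (PySem.Str.slice target none (some (3:Int))) = "wss" := by simpa using hl
            rw [if_neg h1, if_neg h2, if_neg h3, if_neg h4, if_pos h5, hf', if_pos ⟨by norm_num, by rw [hl']; decide⟩]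
            rw [(by decide : PySem.Str.len "wss://" = (6:Int))]; norm_num
          · rw [if_neg h1, if_neg h2, if_neg h3, if_neg h4, if_neg h5]
            by_cases hB : PySem.Str.find target "://" ≠ -1 ∧ PySem.Str.lower (PySem.Str.slice target none (some (PySem.Str.find target "://"))) ∈ (["http", "https", "ftp", "ftps", "wss"] : List String)
            · obtain ⟨hne, hmem⟩ := hB
              simp only [List.mem_cons, List.not_mem_nil, or_false] at hmem
              rcases hmem with hm | hm | hm | hm | hm
              · exact absurd (nomatch_case target "http://" "http" ['h','t','t','p'] (by decide) (by decide) hne hm) h1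
              · exact absurd (nomatch_case target "https://" "https" ['h','t','t','p','s'] (by decide) (by decide) hne hm) h2
              · exact absurd (nomatch_case target "ftp://" "ftp" ['f','t','p'] (by decide) (by decide) hne hm) h3
              · exact absurd (nomatch_case target "ftps://" "ftps" ['f','t','p','s'] (by decide) (by decide) hne hm) h4
              · exact absurd (nomatch_case target "wss://" "wss" ['w','s','s'] (by decide) (by decide) hne hm) h5
            · rw [if_neg hB]
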